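-- pv_equiv track=rewrite | github.com/gsethupathy5/AI_For_CS | python/2499.minimum-total-cost-to-make-arrays-unequal/solution.py | minimumTotalCost
-- ===== SOURCE A (Python) =====
-- from typing import List
--
-- def minimumTotalCost(nums1: List[int], nums2: List[int]) -> int:
--     cost = 0
--     for i in range(len(nums1)):
--         if nums1[i] == nums2[i]:
--             cost += min(nums1.count(nums1[i]), nums2.count(nums1[i])) - 1
--     if cost % 2 != 0:
--         cost += 1
--     return cost if cost != 0 else -1
-- ===== SOURCE B (Python) =====
-- def minimumTotalCost(nums1, nums2):
--     s1 = sorted(nums1)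
--     s2 = sorted(nums2)
--     sm = sorted(a for a, b in zip(nums1, nums2) if a == b)
--     cost = 0
--     i = j = k = 0
--     while k < len(sm):
--         v = sm[k]
--         r = 1
--         while k + r < len(sm) and sm[k + r] == v:
--             r += 1
--         while i < len(s1) and s1[i] < v:
--             i += 1
--         c1 = 0
--         while i + c1 < len(s1) and s1[i + c1] == v:
--             c1 += 1
--         while j < len(s2) and s2[j] < v:
--             j += 1
--         c2 = 0
--         while j + c2 < len(s2) and s2[j + c2] == v:
--             c2 += 1
--         cost += r * (min(c1, c2) - 1)
--         k += r
--     if cost % 2 != 0: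
--         cost += 1
--     return cost if cost != 0 else -1
-- ===== Notes on version B (the rewrite author's own statement) =====
-- stated objective: alternative
-- what changed: B sorts nums1, nums2 and the matched values once and makes a single three-pointer merge scan over the sorted lists, adding run_length*(min(run1,run2)-1) per run of equal matched values, instead of A's per-index loop that rescans both lists with count() at every matched index.
import Mathlib
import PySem

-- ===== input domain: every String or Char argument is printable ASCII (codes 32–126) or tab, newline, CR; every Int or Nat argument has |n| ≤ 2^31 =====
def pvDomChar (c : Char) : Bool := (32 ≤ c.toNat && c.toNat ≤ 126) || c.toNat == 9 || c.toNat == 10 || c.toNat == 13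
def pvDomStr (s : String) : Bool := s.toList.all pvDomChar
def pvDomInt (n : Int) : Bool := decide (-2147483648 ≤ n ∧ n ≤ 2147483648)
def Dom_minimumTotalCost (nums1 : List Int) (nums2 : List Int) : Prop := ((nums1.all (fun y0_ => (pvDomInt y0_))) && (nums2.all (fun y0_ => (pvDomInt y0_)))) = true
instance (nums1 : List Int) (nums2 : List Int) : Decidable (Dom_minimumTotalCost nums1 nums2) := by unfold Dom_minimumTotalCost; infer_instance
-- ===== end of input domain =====

-- B replaces A's per-index loop with count() rescans by sort-then-merge: sort both lists
-- and the matched values once, then one three-pointer scan over runs of equal values.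

-- ===== PORT A =====
def minimumTotalCost (nums1 : List Int) (nums2 : List Int) : Int :=
  let cost : Int := (PySem.List.pyRange 0 nums1.length 1).foldl (fun cost i =>
    match PySem.List.pyGet? nums1 i, PySem.List.pyGet? nums2 i with
    | some a, some b =>
        if a = b then cost + (min (nums1.count a : Int) (nums2.count a : Int) - 1) else cost
    | _, _ => cost) 0        -- 'none' = IndexError; Pre_ rules it out
  let cost := if PySem.Int.mod cost 2 ≠ 0 then cost + 1 else cost
  if cost ≠ 0 then cost else -1

-- ===== PORT B =====
-- 'while s[i] < v: i += 1' — advance a pointer past the elements below v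
def pvSkipLt (v : Int) : List Int → List Int
  | [] => []
  | x :: xs => if x < v then pvSkipLt v xs else x :: xs

-- 'while s[i+c] == v: c += 1' — length of the run of v at the pointer
def pvRunLen (v : Int) : List Int → Nat
  | [] => 0
  | x :: xs => if x = v then pvRunLen v xs + 1 else 0

-- the outer 'while k < len(sm)' loop over runs of matched values
-- (fuel = length of sm, a totality guard only: each step consumes at least one element)
def pvScanRunsGo : Nat → List Int → List Int → List Int → Int → Int
  | _, _, _, [], cost => cost
  | 0, _, _, _, cost => cost
  | fuel + 1, s1, s2, v :: sm, cost =>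
    let r : Nat := pvRunLen v sm + 1
    let s1' := pvSkipLt v s1
    let c1 : Nat := pvRunLen v s1'
    let s2' := pvSkipLt v s2
    let c2 : Nat := pvRunLen v s2'
    pvScanRunsGo fuel s1' s2' (sm.drop (pvRunLen v sm))
      (cost + (r : Int) * (min (c1 : Int) (c2 : Int) - 1))

def pvScanRuns (s1 s2 sm : List Int) (cost : Int) : Int :=
  pvScanRunsGo sm.length s1 s2 sm cost

def minimumTotalCost_alt (nums1 : List Int) (nums2 : List Int) : Int :=
  let s1 := PySem.List.sorted nums1 (fun x => x) false
  let s2 := PySem.List.sorted nums2 (fun x => x) false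
  let sm := PySem.List.sorted (((nums1.zip nums2).filter (fun p => p.1 = p.2)).map (·.1))
              (fun x => x) false
  let cost := pvScanRuns s1 s2 sm 0
  let cost := if PySem.Int.mod cost 2 ≠ 0 then cost + 1 else cost
  if cost ≠ 0 then cost else -1

-- ===== PRECONDITION & SPEC =====
-- Pre_ excludes exactly the inputs where A raises IndexError (nums2 shorter than nums1).
def Pre_minimumTotalCost (nums1 : List Int) (nums2 : List Int) : Prop :=
  nums1.length ≤ nums2.length
instance (nums1 : List Int) (nums2 : List Int) : Decidable (Pre_minimumTotalCost nums1 nums2) := by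
  unfold Pre_minimumTotalCost; infer_instance
def pvWitness_minimumTotalCost : List Int × List Int := ([1, 2, 1], [1, 3, 1])

def Spec_minimumTotalCost (nums1 : List Int) (nums2 : List Int) (out : Int) : Prop := out = minimumTotalCost_alt nums1 nums2
instance (nums1 : List Int) (nums2 : List Int) (out : Int) : Decidable (Spec_minimumTotalCost nums1 nums2 out) := by unfold Spec_minimumTotalCost; infer_instance

-- ===== CLAIM (what is proved, stated in full; the proofs are below) =====
def Claim_equal_minimumTotalCost : Prop := ∀ (nums1 : List Int) (nums2 : List Int), Dom_minimumTotalCost nums1 nums2 → Pre_minimumTotalCost nums1 nums2 → Spec_minimumTotalCost nums1 nums2 (minimumTotalCost nums1 nums2)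
-- ===== LEMMAS AND PROOFS =====

-- the per-value cost A sums, and the matched-value list
def pvF (nums1 nums2 : List Int) (v : Int) : Int :=
  min (nums1.count v : Int) (nums2.count v : Int) - 1

def pvM (nums1 nums2 : List Int) : List Int :=
  ((nums1.zip nums2).filter (fun p => p.1 = p.2)).map (·.1)

-- A's index loop equals the sum of g over the matched values
theorem a_loop2 (g : Int → Int) :
    ∀ (l1 l2 : List Int) (acc : Int), l1.length ≤ l2.length →
      (List.range l1.length).foldl (fun c i =>
        match l1[i]?, l2[i]? with
        | some a, some b => if a = b then c + g a else c
        | _, _ => c) acc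
      = acc + ((((l1.zip l2).filter (fun p => p.1 = p.2)).map (·.1)).map g).sum := by
  intro l1
  induction l1 with
  | nil => intro l2 acc _; simp
  | cons x xs ih =>
      intro l2 acc h
      cases l2 with
      | nil => simp at h
      | cons y ys =>
          simp only [List.length_cons, List.range_succ_eq_map, List.foldl_cons, List.foldl_map]
          simp only [List.getElem?_cons_zero, List.getElem?_cons_succ]
          rw [ih ys _ (by simpa using h)]
          by_cases hxy : x = y
          · simp [hxy]; ring
          · simp [hxy]

theorem a_loop_eq (nums1 nums2 : List Int) (h : nums1.length ≤ nums2.length) :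
    (PySem.List.pyRange 0 nums1.length 1).foldl (fun cost i =>
      match PySem.List.pyGet? nums1 i, PySem.List.pyGet? nums2 i with
      | some a, some b =>
          if a = b then cost + (min (nums1.count a : Int) (nums2.count a : Int) - 1) else cost
      | _, _ => cost) 0 = ((pvM nums1 nums2).map (pvF nums1 nums2)).sum := by
  rw [PySem.List.pyRange_zero_natCast, List.foldl_map]
  simp only [PySem.List.pyGet?_natCast]
  have := a_loop2 (fun a => min (nums1.count a : Int) (nums2.count a : Int) - 1) nums1 nums2 0 h
  simpa [pvM, pvF] using this

-- pvSkipLt drops only elements below v: counts of values ≥ v are unchanged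
theorem count_skipLt (v w : Int) (hvw : v ≤ w) :
    ∀ l : List Int, (pvSkipLt v l).count w = l.count w := by
  intro l
  induction l with
  | nil => rfl
  | cons x xs ih =>
      by_cases hx : x < v
      · have hxw : x ≠ w := by omega
        simp [pvSkipLt, hx, ih, hxw]
      · simp [pvSkipLt, hx]

theorem skipLt_pairwise (v : Int) :
    ∀ l : List Int, l.Pairwise (· ≤ ·) → (pvSkipLt v l).Pairwise (· ≤ ·) := by
  intro l
  induction l with
  | nil => intro _; exact List.Pairwise.nil
  | cons x xs ih =>
      intro h
      by_cases hx : x < v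
      · simpa [pvSkipLt, hx] using ih (List.pairwise_cons.mp h).2
      · simpa [pvSkipLt, hx] using h

theorem skipLt_ge (v : Int) :
    ∀ l : List Int, l.Pairwise (· ≤ ·) → ∀ x ∈ pvSkipLt v l, v ≤ x := by
  intro l
  induction l with
  | nil => intro _ x hx; simp [pvSkipLt] at hx
  | cons y ys ih =>
      intro h x hx
      rcases List.pairwise_cons.mp h with ⟨hy, hys⟩
      by_cases hyv : y < v
      · exact ih hys x (by simpa [pvSkipLt, hyv] using hx)
      · simp [pvSkipLt, hyv] at hx
        rcases hx with rfl | hx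
        · omega
        · have := hy x hx; omega

-- in a sorted list whose elements are all ≥ v, the leading run of v is all of its occurrences
theorem runLen_eq_count (v : Int) :
    ∀ l : List Int, l.Pairwise (· ≤ ·) → (∀ x ∈ l, v ≤ x) → pvRunLen v l = l.count v := by
  intro l
  induction l with
  | nil => intro _ _; rfl
  | cons x xs ih =>
      intro h hge
      rcases List.pairwise_cons.mp h with ⟨hx, hxs⟩
      by_cases hxv : x = v
      · subst hxv
        simp [pvRunLen, ih hxs (fun y hy => hge y (List.mem_cons_of_mem _ hy))]
      · have hvx : v < x := lt_of_le_of_ne (hge x (List.mem_cons_self)) (Ne.symm hxv)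
        have : xs.count v = 0 := by
          rw [List.count_eq_zero]
          intro hv
          have := hx v hv; omega
        simp [pvRunLen, hxv, this]

theorem take_runLen (v : Int) :
    ∀ l : List Int, l.take (pvRunLen v l) = List.replicate (pvRunLen v l) v := by
  intro l
  induction l with
  | nil => rfl
  | cons x xs ih =>
      by_cases hx : x = v
      · subst hx; simp [pvRunLen, List.replicate_succ, ih]
      · simp [pvRunLen, hx]

-- B's merge scan computes the per-matched-value sum of min counts minus one
theorem scan_go_eq :
    ∀ (n : Nat) (sm s1 s2 : List Int) (cost : Int), sm.length ≤ n →
      sm.Pairwise (· ≤ ·) → s1.Pairwise (· ≤ ·) → s2.Pairwise (· ≤ ·) →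
      pvScanRunsGo n s1 s2 sm cost
        = cost + (sm.map (fun v => min (s1.count v : Int) (s2.count v : Int) - 1)).sum := by
  intro n
  induction n with
  | zero =>
      intro sm s1 s2 cost hn _ _ _
      have : sm = [] := List.eq_nil_of_length_eq_zero (Nat.le_zero.mp hn)
      subst this; simp [pvScanRunsGo]
  | succ n ih =>
      intro sm s1 s2 cost hn hsm hs1 hs2
      cases sm with
      | nil => simp [pvScanRunsGo]
      | cons v rest =>
          rcases List.pairwise_cons.mp hsm with ⟨hvrest, hrest⟩
          have hge1 := skipLt_ge v s1 hs1
          have hge2 := skipLt_ge v s2 hs2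
          have hp1 := skipLt_pairwise v s1 hs1
          have hp2 := skipLt_pairwise v s2 hs2
          have hc1 : pvRunLen v (pvSkipLt v s1) = s1.count v := by
            rw [runLen_eq_count v _ hp1 hge1, count_skipLt v v le_rfl]
          have hc2 : pvRunLen v (pvSkipLt v s2) = s2.count v := by
            rw [runLen_eq_count v _ hp2 hge2, count_skipLt v v le_rfl]
          rw [pvScanRunsGo]
          have hrest' : (rest.drop (pvRunLen v rest)).Pairwise (· ≤ ·) :=
            hrest.sublist (List.drop_sublist _ _)
          have hmem_drop : ∀ w ∈ rest.drop (pvRunLen v rest), v ≤ w := fun w hw =>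
            hvrest w (List.mem_of_mem_drop hw)
          rw [ih (rest.drop (pvRunLen v rest)) (pvSkipLt v s1) (pvSkipLt v s2) _
              (by rw [List.length_drop]; simp only [List.length_cons] at hn; omega)
              hrest' hp1 hp2]
          -- rewrite counts in the recursive sum back to counts in s1, s2
          have hmapeq :
              (rest.drop (pvRunLen v rest)).map
                  (fun w => min ((pvSkipLt v s1).count w : Int) ((pvSkipLt v s2).count w : Int) - 1)
                = (rest.drop (pvRunLen v rest)).map
                  (fun w => min (s1.count w : Int) (s2.count w : Int) - 1) := by
            apply List.map_congr_left
            intro w hw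
            rw [count_skipLt v w (hmem_drop w hw), count_skipLt v w (hmem_drop w hw)]
          rw [hmapeq, hc1, hc2]
          -- split the sum over rest into the leading run of v and the remainder
          have hsplit : rest = rest.take (pvRunLen v rest) ++ rest.drop (pvRunLen v rest) :=
            (List.take_append_drop _ _).symm
          calc
            cost + ((pvRunLen v rest : Int) + 1) * (min (s1.count v : Int) (s2.count v : Int) - 1)
                + ((rest.drop (pvRunLen v rest)).map
                    (fun w => min (s1.count w : Int) (s2.count w : Int) - 1)).sum
              = cost + ((v :: rest).map
                  (fun w => min (s1.count w : Int) (s2.count w : Int) - 1)).sum := by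
                conv_rhs => rw [hsplit]
                rw [take_runLen]
                simp [List.sum_replicate]
                ring
            _ = _ := rfl

-- counts are preserved by sorting (sorted is a permutation)
theorem count_sorted (l : List Int) (v : Int) :
    (PySem.List.sorted l (fun x => x) false).count v = l.count v :=
  (PySem.List.sorted_perm l (fun x => x) false).count_eq v

theorem b_cost_eq (nums1 nums2 : List Int) :
    pvScanRuns (PySem.List.sorted nums1 (fun x => x) false)
      (PySem.List.sorted nums2 (fun x => x) false)
      (PySem.List.sorted (pvM nums1 nums2) (fun x => x) false) 0
      = ((pvM nums1 nums2).map (pvF nums1 nums2)).sum := by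
  unfold pvScanRuns
  rw [scan_go_eq (PySem.List.sorted (pvM nums1 nums2) (fun x => x) false).length _ _ _ 0 le_rfl
      (by simpa using PySem.List.sorted_pairwise (pvM nums1 nums2) (fun x => x))
      (by simpa using PySem.List.sorted_pairwise nums1 (fun x => x))
      (by simpa using PySem.List.sorted_pairwise nums2 (fun x => x))]
  rw [zero_add]
  have h1 : (PySem.List.sorted (pvM nums1 nums2) (fun x => x) false).map
      (fun v => min ((PySem.List.sorted nums1 (fun x => x) false).count v : Int)
                    ((PySem.List.sorted nums2 (fun x => x) false).count v : Int) - 1)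
      = (PySem.List.sorted (pvM nums1 nums2) (fun x => x) false).map (pvF nums1 nums2) := by
    apply List.map_congr_left
    intro w _
    simp [count_sorted, pvF]
  rw [h1]
  exact ((PySem.List.sorted_perm (pvM nums1 nums2) (fun x => x) false).map
    (pvF nums1 nums2)).sum_eq

-- ===== VERDICT (by name: the statement is the Claim_ definition above) =====
theorem minimumTotalCost_spec : Claim_equal_minimumTotalCost := by
  intro nums1 nums2 _ hpre
  unfold Spec_minimumTotalCost minimumTotalCost minimumTotalCost_alt
  have hA := a_loop_eq nums1 nums2 hpre
  have hB := b_cost_eq nums1 nums2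
  simp only [pvM] at hA hB
  dsimp only
  rw [hA, hB]
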